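-- pv_equiv track=rewrite | github.com/DashKosaka/fpga_stepmania | ECE385-HelperTools/PNG To Hex/On-Chip Memory/scripts/conv_to_sv.py | construct_sprite_table
-- ===== SOURCE A (Python) =====
-- def construct_sprite_table(sprite_table_lines, num_digits, num_bits, lst, width):
--     clen = len(lst) - 1
--     i = 0
--     for el in lst:
--         entry = str(num_bits) + "'d" + str(int(el)).zfill(num_digits)
--         if(i % width == 0):
--             sprite_table_lines += "'{"
--         if(i == clen):
--             sprite_table_lines += entry + "}};\n"
--         else:
--             if(i % width == width - 1):
--                 sprite_table_lines += entry + "},\n"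
--             else:
--                 sprite_table_lines += entry + ","
--         i += 1
--     return sprite_table_lines
-- ===== SOURCE B (Python) =====
-- def construct_sprite_table(sprite_table_lines, num_digits, num_bits, lst, width):
--     rows = []
--     for start in range(0, len(lst), width):
--         chunk = lst[start:start + width]
--         row = "'{" + ",".join(
--             str(num_bits) + "'d" + str(int(el)).zfill(num_digits) for el in chunk)
--         rows.append(row)
--     if not rows:
--         return sprite_table_lines
--     return sprite_table_lines + "},\n".join(rows) + "}};\n"
-- ===== Notes on version B (the rewrite author's own statement) =====
-- stated objective: simpler
-- what changed: A builds the string in one element loop that tracks a counter i and decides each element's decoration by i % width and an i == clen last-element test; B instead slices lst into rows of size width, renders each row as "'{" plus a comma-join of its entries, and joins the rows with "},\n" plus a final "}};\n".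
-- outside the precondition, e.g. on construct_sprite_table('', 2, 8, [3, 4, 5], -2): A returns "'{8'd03,8'd04,'{8'd05}};\n", B returns ''; on construct_sprite_table('x', 2, 8, [], 0): A returns 'x', B raises ValueError
import Mathlib
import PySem

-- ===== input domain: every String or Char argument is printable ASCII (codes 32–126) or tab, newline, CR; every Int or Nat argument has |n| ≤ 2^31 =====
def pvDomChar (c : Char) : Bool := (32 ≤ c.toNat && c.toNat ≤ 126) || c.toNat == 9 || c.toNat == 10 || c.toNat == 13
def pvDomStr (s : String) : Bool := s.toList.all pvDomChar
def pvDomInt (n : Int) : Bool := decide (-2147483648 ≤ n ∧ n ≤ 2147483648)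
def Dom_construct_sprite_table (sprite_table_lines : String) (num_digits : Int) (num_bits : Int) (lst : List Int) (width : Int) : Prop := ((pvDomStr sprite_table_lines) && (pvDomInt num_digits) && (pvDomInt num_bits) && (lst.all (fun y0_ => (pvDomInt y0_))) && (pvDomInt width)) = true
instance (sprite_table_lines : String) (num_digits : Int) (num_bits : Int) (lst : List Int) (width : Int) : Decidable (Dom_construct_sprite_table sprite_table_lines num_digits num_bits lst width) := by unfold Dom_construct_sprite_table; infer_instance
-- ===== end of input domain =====

-- B replaces A's index-and-modulus loop by chunking the list into rows and joining them (simpler decomposition, same cost);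
-- string building is done on List Char (PySem.Chars) exactly as the Python builds str.

-- shared entry formatter: str(num_bits) + "'d" + str(int(el)).zfill(num_digits), identical subexpression of both Pythons
def pvEntry (num_digits num_bits : Int) (el : Int) : List Char :=
  PySem.Int.toChars num_bits ++ "'d".toList ++ PySem.Chars.zfill (PySem.Int.toChars el) num_digits

-- ===== PORT A =====
-- A's loop body: the running string and the counter i
def pvStepA (num_digits num_bits clen width : Int) (st : List Char × Int) (el : Int) : List Char × Int :=
  let entry := pvEntry num_digits num_bits el
  let acc := st.1
  let i := st.2
  let acc := if PySem.Int.mod i width = 0 then acc ++ "'{".toList else acc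
  let acc := if i = clen then acc ++ entry ++ "}};\n".toList
             else if PySem.Int.mod i width = width - 1 then acc ++ entry ++ "},\n".toList
             else acc ++ entry ++ [',']
  (acc, i + 1)

def construct_sprite_table (sprite_table_lines : String) (num_digits : Int) (num_bits : Int) (lst : List Int) (width : Int) : String :=
  let clen : Int := (lst.length : Int) - 1
  String.ofList ((lst.foldl (pvStepA num_digits num_bits clen width) (sprite_table_lines.toList, 0)).1)

-- ===== PORT B =====
-- one row: "'{" + ",".join(entries of the chunk)
def pvRow (num_digits num_bits : Int) (chunk : List Int) : List Char :=
  "'{".toList ++ PySem.Chars.join [','] (chunk.map (pvEntry num_digits num_bits))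

def construct_sprite_table_alt (sprite_table_lines : String) (num_digits : Int) (num_bits : Int) (lst : List Int) (width : Int) : String :=
  let rows := (PySem.List.pyRange 0 (lst.length : Int) width).map
      (fun start => pvRow num_digits num_bits (PySem.List.slice lst (some start) (some (start + width))))
  if rows = [] then sprite_table_lines
  else String.ofList (sprite_table_lines.toList ++ PySem.Chars.join "},\n".toList rows ++ "}};\n".toList)

-- ===== PRECONDITION & SPEC =====
-- Pre_ restricts to the natural domain of a positive row width: for width = 0 A raises ZeroDivisionError on any
-- nonempty lst (and Source B's range raises ValueError even on the empty one), and a non-positive width is outside the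
-- function's natural domain (a row width), so B's range-based chunking naturally produces no rows there.
def Pre_construct_sprite_table (sprite_table_lines : String) (num_digits : Int) (num_bits : Int) (lst : List Int) (width : Int) : Prop := 1 ≤ width
instance (sprite_table_lines : String) (num_digits : Int) (num_bits : Int) (lst : List Int) (width : Int) : Decidable (Pre_construct_sprite_table sprite_table_lines num_digits num_bits lst width) := by unfold Pre_construct_sprite_table; infer_instance
def pvWitness_construct_sprite_table : String × Int × Int × List Int × Int := ("", 2, 8, [3, 4, 5], 2)

def Spec_construct_sprite_table (sprite_table_lines : String) (num_digits : Int) (num_bits : Int) (lst : List Int) (width : Int) (out : String) : Prop := out = construct_sprite_table_alt sprite_table_lines num_digits num_bits lst width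
instance (sprite_table_lines : String) (num_digits : Int) (num_bits : Int) (lst : List Int) (width : Int) (out : String) : Decidable (Spec_construct_sprite_table sprite_table_lines num_digits num_bits lst width out) := by unfold Spec_construct_sprite_table; infer_instance

-- ===== CLAIM (what is proved, stated in full; the proofs are below) =====
def Claim_equal_construct_sprite_table : Prop := ∀ (sprite_table_lines : String) (num_digits : Int) (num_bits : Int) (lst : List Int) (width : Int), Dom_construct_sprite_table sprite_table_lines num_digits num_bits lst width → Pre_construct_sprite_table sprite_table_lines num_digits num_bits lst width → Spec_construct_sprite_table sprite_table_lines num_digits num_bits lst width (construct_sprite_table sprite_table_lines num_digits num_bits lst width)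

-- ===== LEMMAS AND PROOFS =====

-- what A's loop still emits when the remaining elements are `rest` and the current index is ≡ j (mod width)
def pvRender (num_digits num_bits width : Int) : Int → List Int → List Char
  | _, [] => []
  | j, el :: r =>
      (if j = 0 then "'{".toList else [])
      ++ pvEntry num_digits num_bits el
      ++ (if r = [] then "}};\n".toList
          else if j = width - 1 then "},\n".toList else [','])
      ++ pvRender num_digits num_bits width (PySem.Int.mod (j + 1) width) r

theorem pv_mod_succ (i w : Int) : (i % w + 1) % w = (i + 1) % w := by
  conv_rhs => rw [Int.add_emod]
  rw [Int.add_emod (i % w) 1, Int.emod_emod_of_dvd _ dvd_rfl]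

-- A's fold, characterised by pvRender
theorem pv_foldA (nd nb w n : Int) (hw : 1 ≤ w) :
    ∀ (rest : List Int) (acc : List Char) (i : Int), 0 ≤ i → i + (rest.length : Int) = n →
      (rest.foldl (pvStepA nd nb (n - 1) w) (acc, i)).1
        = acc ++ pvRender nd nb w (PySem.Int.mod i w) rest := by
  intro rest
  induction rest with
  | nil => intro acc i _ _; simp [pvRender]
  | cons el r ih =>
    intro acc i hi hn
    have hw' : (0:Int) < w := by omega
    have hmod : PySem.Int.mod i w = i % w := PySem.Int.mod_eq_emod_of_pos hw'
    have hmodj : PySem.Int.mod (i % w + 1) w = PySem.Int.mod (i + 1) w := by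
      rw [PySem.Int.mod_eq_emod_of_pos hw', PySem.Int.mod_eq_emod_of_pos hw', pv_mod_succ]
    have hlast : (i = n - 1) ↔ (r = []) := by
      constructor
      · intro h
        have hr0 : (r.length : Int) = 0 := by
          simp only [List.length_cons] at hn; push_cast at hn; omega
        have : r.length = 0 := by exact_mod_cast hr0
        exact List.length_eq_zero_iff.mp this
      · intro h; subst h; simp only [List.length_cons, List.length_nil] at hn; push_cast at hn; omega
    simp only [List.foldl_cons]
    have hstep : pvStepA nd nb (n - 1) w (acc, i) el =
        ((if i % w = 0 then acc ++ "'{".toList else acc)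
         ++ pvEntry nd nb el
         ++ (if r = [] then "}};\n".toList
             else if i % w = w - 1 then "},\n".toList else [',']), i + 1) := by
      simp only [pvStepA, hmod, hlast]
      by_cases h0 : i % w = 0 <;> by_cases hr : r = [] <;> by_cases h1 : i % w = w - 1 <;>
        simp [h0, hr, h1, List.append_assoc] <;> split_ifs <;> simp [List.append_assoc]
    rw [hstep, ih _ (i + 1) (by omega) (by simp only [List.length_cons] at hn; push_cast at hn ⊢; omega)]
    conv_rhs => rw [pvRender]
    rw [hmod, hmodj]
    by_cases h0 : i % w = 0 <;> simp [h0, List.append_assoc]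

-- pvRender from offset j, as the current chunk's tail plus the rest
theorem pv_render_chunk (nd nb w : Int) (hw : 1 ≤ w) :
    ∀ (rest : List Int) (j : Int), rest ≠ [] → 0 ≤ j → j < w →
      pvRender nd nb w j rest =
        (if j = 0 then "'{".toList else [])
        ++ PySem.Chars.join [','] ((rest.take (w - j).toNat).map (pvEntry nd nb))
        ++ (if rest.drop (w - j).toNat = [] then "}};\n".toList
            else "},\n".toList ++ pvRender nd nb w 0 (rest.drop (w - j).toNat)) := by
  intro rest
  induction rest with
  | nil => intro j h; exact absurd rfl h
  | cons el r ih =>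
    intro j _ hj0 hjw
    have hw' : (0:Int) < w := by omega
    have hK : (w - j).toNat = (w - j - 1).toNat + 1 := by omega
    rw [hK]
    simp only [List.take_succ_cons, List.drop_succ_cons]
    by_cases hr : r = []
    · subst hr
      simp [pvRender, PySem.Chars.join_singleton, List.append_assoc]
    · by_cases h1 : j = w - 1
      · have hk0 : (w - j - 1).toNat = 0 := by omega
        have hmod0 : PySem.Int.mod (j + 1) w = 0 := by
          rw [PySem.Int.mod_eq_emod_of_pos hw']
          have : j + 1 = w := by omega
          rw [this, Int.emod_self]
        conv_lhs => rw [pvRender]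
        rw [hmod0, hk0]
        simp [hr, h1, PySem.Chars.join_singleton, List.append_assoc]
      · rcases r with _ | ⟨y, r₂⟩
        · exact absurd rfl hr
        obtain ⟨k₂, hk₂⟩ : ∃ k₂, (w - j - 1).toNat = k₂ + 1 := ⟨(w - j - 1).toNat - 1, by omega⟩
        have hmodj : PySem.Int.mod (j + 1) w = j + 1 := by
          rw [PySem.Int.mod_eq_emod_of_pos hw']
          exact Int.emod_eq_of_lt (by omega) (by omega)
        have hsub : (w - (j + 1)).toNat = (w - j - 1).toNat := by omega
        conv_lhs => rw [pvRender]
        rw [hmodj, ih (j + 1) (by simp) (by omega) (by omega), hsub, hk₂]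
        simp only [List.take_succ_cons, List.drop_succ_cons, List.map_cons]
        have hjne : ¬ (j + 1 = 0) := by omega
        rw [if_neg hjne, PySem.Chars.join_cons_cons]
        simp [hr, h1, List.append_assoc]

theorem pv_pyRange_pos_cons (a b s : Int) (hs : 0 < s) (hab : a < b) :
    PySem.List.pyRange a b s = a :: PySem.List.pyRange (a + s) b s := by
  rw [PySem.List.pyRange_of_pos _ _ hs, PySem.List.pyRange_of_pos _ _ hs, if_pos hab]
  by_cases h2 : a + s < b
  · rw [if_pos h2]
    have hu : 0 ≤ (b - (a + s) + s - 1) / s := Int.ediv_nonneg (by omega) (by omega)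
    have hdiv : (b - a + s - 1) / s = (b - (a + s) + s - 1) / s + 1 := by
      have h := Int.add_mul_ediv_right (b - (a + s) + s - 1) 1 (by omega : s ≠ 0)
      have he : b - (a + s) + s - 1 + 1 * s = b - a + s - 1 := by ring
      rw [he] at h; omega
    have hcnt : ((b - a + s - 1) / s).toNat = ((b - (a + s) + s - 1) / s).toNat + 1 := by omega
    rw [hcnt, List.range_succ_eq_map, List.map_cons, List.map_map]
    refine congrArg₂ _ (by ring) (List.map_congr_left ?_)
    intro k _
    simp only [Function.comp]
    push_cast
    ring
  · rw [if_neg h2]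
    have hone : (b - a + s - 1) / s = 1 := by
      rw [← PySem.Int.floordiv_eq_ediv_of_pos hs]
      rw [PySem.Int.floordiv_eq_iff_of_pos hs]
      omega
    rw [hone]
    simp

-- B's rows joined, from start index a
theorem pv_rows (nd nb w : Int) (lst : List Int) (hw : 1 ≤ w) :
    ∀ (k : Nat) (a : Int), 0 ≤ a → a < (lst.length : Int) → (lst.length : Int) - a ≤ (k : Int) →
      pvRender nd nb w 0 (lst.drop a.toNat)
        = PySem.Chars.join "},\n".toList
            ((PySem.List.pyRange a (lst.length : Int) w).map
              (fun start => pvRow nd nb (PySem.List.slice lst (some start) (some (start + w)))))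
          ++ "}};\n".toList := by
  intro k
  induction k with
  | zero => intro a ha hlt hk; exfalso; simp only [Nat.cast_zero] at hk; omega
  | succ k ih =>
    intro a ha hlt hk
    have hw' : (0:Int) < w := by omega
    have hatn : a.toNat < lst.length := by omega
    have hrest : lst.drop a.toNat ≠ [] := by
      intro h
      have := List.drop_eq_nil_iff.mp h
      omega
    rw [pv_pyRange_pos_cons a _ w hw' hlt, List.map_cons]
    have hslice : PySem.List.slice lst (some a) (some (a + w)) = (lst.drop a.toNat).take w.toNat := by
      rw [PySem.List.slice_toNat lst ha (by omega)]
      congr 1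
      omega
    rw [pv_render_chunk nd nb w hw (lst.drop a.toNat) 0 hrest le_rfl hw']
    simp only [sub_zero]
    have hdrop : (lst.drop a.toNat).drop w.toNat = lst.drop (a + w).toNat := by
      rw [List.drop_drop]
      congr 1
      omega
    rw [hdrop]
    by_cases hend : lst.drop (a + w).toNat = []
    · have hnb : (lst.length : Int) ≤ a + w := by
        have := List.drop_eq_nil_iff.mp hend
        omega
      have hnil : PySem.List.pyRange (a + w) (lst.length : Int) w = [] := by
        rw [PySem.List.pyRange_of_pos _ _ hw', if_neg (by omega)]
        simp
      rw [hnil, hend]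
      simp [pvRow, hslice, PySem.Chars.join_singleton, List.append_assoc]
    · have hlt2 : a + w < (lst.length : Int) := by
        have hnn := List.drop_eq_nil_iff.not.mp hend
        omega
      rw [if_neg hend, ih (a + w) (by omega) hlt2 (by push_cast at hk ⊢; omega)]
      rw [pv_pyRange_pos_cons (a + w) _ w hw' hlt2, List.map_cons, PySem.Chars.join_cons_cons]
      simp [pvRow, hslice, List.append_assoc]

-- ===== VERDICT (by name: the statement is the Claim_ definition above) =====
theorem construct_sprite_table_spec : Claim_equal_construct_sprite_table := by
  intro s nd nb lst w _ hpre
  have hw : (1:Int) ≤ w := hpre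
  have hw' : (0:Int) < w := by omega
  unfold Spec_construct_sprite_table
  simp only [construct_sprite_table, construct_sprite_table_alt]
  by_cases hl : lst = []
  · subst hl
    rw [PySem.List.pyRange_of_pos _ _ hw']
    simp [String.ofList_toList]
  · have hlen : 0 < (lst.length : Int) := by
      rcases lst with _ | _
      · exact absurd rfl hl
      · simp
    rw [pv_foldA nd nb w (lst.length : Int) hw lst s.toList 0 le_rfl (by simp)]
    have h0 : PySem.Int.mod 0 w = 0 := by
      rw [PySem.Int.mod_eq_emod_of_pos hw']
      simp
    rw [h0]
    have hrows := pv_rows nd nb w lst hw lst.length 0 le_rfl hlen (by simp)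
    simp only [Int.toNat_zero, List.drop_zero] at hrows
    rw [hrows]
    rw [pv_pyRange_pos_cons 0 _ w hw' hlen, List.map_cons]
    rw [if_neg (by simp)]
    simp [List.append_assoc]
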